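-- pv_equiv track=rewrite | github.com/huginandmunin/leetcode-solutions | python/p1779_find_nearest_point_that_has_the_same_x_or_y_coordinate.py | nearestValidPoint
-- ===== SOURCE A (Python) =====
-- from typing import List
--
-- def nearestValidPoint(x: int, y: int, points: List[List[int]]) -> int:
--     """
--     You are given two integers, x and y, which represent your current location
--     on a Cartesian grid: (x, y). You are also given an array points where
--     each points[i] = [ai, bi] represents that a point exists at (ai, bi).
--     A point is valid if it shares the same x-coordinate or the same y-coordinate
--     as your location.
--
--     Return the index (0-indexed) of the valid point with the
--     smallest Manhattan distance from your current location.
--     If there are multiple, return the valid point with the smallest index.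
--     If there are no valid points, return -1.
--     """
--
--     # Get list of points with same x or y
--     dist_dict = [{'i':i,'md':abs(x-p[0])+abs(y-p[1])}
--                 for i,p in enumerate(points,0)
--                 if (x==p[0] or y==p[1])]
--     if len(dist_dict) < 1:
--         return -1
--
--     # Sort by Manhattan distance
--     dist_sorted = sorted(dist_dict, key=lambda k:k['md'])
--     # Return the index value captured in the first item in sorted dict
--     return dist_sorted[0]['i']
-- ===== SOURCE B (Python) =====
-- from typing import List
--
-- def nearestValidPoint(x: int, y: int, points: List[List[int]]) -> int:
--     # Single linear pass: track the best index and its Manhattan distance,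
--     # updating only on a strictly smaller distance (keeps the smallest index on ties).
--     best = -1
--     best_md = -1
--     for i, p in enumerate(points):
--         if x == p[0] or y == p[1]:
--             md = abs(x - p[0]) + abs(y - p[1])
--             if best == -1 or md < best_md:
--                 best, best_md = i, md
--     return best
-- ===== Notes on version B (the rewrite author's own statement) =====
-- stated objective: alternative
-- what changed: replaces build-filtered-list-of-dicts-then-stable-sort-and-take-head with a single linear pass that tracks the minimum distance and its first index with a strict-less update
import Mathlib
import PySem

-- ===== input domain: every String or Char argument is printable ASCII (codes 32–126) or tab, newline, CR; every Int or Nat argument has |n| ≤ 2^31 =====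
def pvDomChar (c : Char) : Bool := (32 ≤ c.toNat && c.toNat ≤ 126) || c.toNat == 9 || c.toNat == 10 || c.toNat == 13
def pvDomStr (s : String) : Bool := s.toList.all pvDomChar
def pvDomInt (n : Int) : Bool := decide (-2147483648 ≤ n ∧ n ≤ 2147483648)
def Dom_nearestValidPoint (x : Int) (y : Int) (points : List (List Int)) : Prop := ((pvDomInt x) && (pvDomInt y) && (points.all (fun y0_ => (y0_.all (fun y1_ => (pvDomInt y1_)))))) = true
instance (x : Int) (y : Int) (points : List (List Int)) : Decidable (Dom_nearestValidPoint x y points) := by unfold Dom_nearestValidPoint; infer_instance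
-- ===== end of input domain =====

-- B replaces A's filter-into-dicts + stable sort + take-head with a single linear pass
-- tracking the minimum Manhattan distance with a strict-less update (objective: alternative).


-- ===== PORT A =====
-- shared subexpressions of both Pythons: the validity test 'x==p[0] or y==p[1]'
-- and the Manhattan distance 'abs(x-p[0])+abs(y-p[1])'
def pvValid (x y : Int) (p : List Int) : Bool :=
  x == PySem.List.pyGetD p 0 0 || y == PySem.List.pyGetD p 1 0

def pvMd (x y : Int) (p : List Int) : Int :=
  |x - PySem.List.pyGetD p 0 0| + |y - PySem.List.pyGetD p 1 0|

-- A: comprehension (filter + map over enumerate), then stable sort by distance, then [0]['i']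
def nearestValidPoint (x : Int) (y : Int) (points : List (List Int)) : Int :=
  let distDict : List (Int × Int) :=
    ((PySem.List.enumerate points 0).filter (fun ip => pvValid x y ip.2)).map
      (fun ip => (ip.1, pvMd x y ip.2))
  if distDict.length < 1 then -1
  else (PySem.List.pyGetD (PySem.List.sorted distDict (fun z => z.2)) 0 ((0 : Int), (0 : Int))).1

-- ===== PORT B =====
-- B: one fold over enumerate carrying (best index, best distance), strict-less update
def pvStep (x y : Int) (st : Int × Int) (ip : Int × List Int) : Int × Int :=
  if pvValid x y ip.2 then
    if st.1 == -1 || decide (pvMd x y ip.2 < st.2) then (ip.1, pvMd x y ip.2) else st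
  else st

def nearestValidPoint_alt (x : Int) (y : Int) (points : List (List Int)) : Int :=
  ((PySem.List.enumerate points 0).foldl (pvStep x y) ((-1 : Int), (-1 : Int))).1

-- ===== PRECONDITION & SPEC =====
-- Pre_ excludes exactly the inputs where the Python A raises IndexError: some point
-- with fewer than two coordinates (p[0]/p[1] out of range). B raises there too.
def Pre_nearestValidPoint (x : Int) (y : Int) (points : List (List Int)) : Prop :=
  ∀ p ∈ points, 2 ≤ p.length
instance (x : Int) (y : Int) (points : List (List Int)) : Decidable (Pre_nearestValidPoint x y points) := by unfold Pre_nearestValidPoint; infer_instance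

def pvWitness_nearestValidPoint : Int × Int × List (List Int) := (3, 4, [[1, 2], [3, 1], [2, 4]])

def Spec_nearestValidPoint (x : Int) (y : Int) (points : List (List Int)) (out : Int) : Prop := out = nearestValidPoint_alt x y points
instance (x : Int) (y : Int) (points : List (List Int)) (out : Int) : Decidable (Spec_nearestValidPoint x y points out) := by unfold Spec_nearestValidPoint; infer_instance

-- ===== CLAIM (what is proved, stated in full; the proofs are below) =====
def Claim_equal_nearestValidPoint : Prop := ∀ (x : Int) (y : Int) (points : List (List Int)), Dom_nearestValidPoint x y points → Pre_nearestValidPoint x y points → Spec_nearestValidPoint x y points (nearestValidPoint x y points)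

-- ===== LEMMAS AND PROOFS =====

-- A's candidate list: (index, distance) of the valid points, in order
def pvCs (x y : Int) (l : List (Int × List Int)) : List (Int × Int) :=
  (l.filter (fun ip => pvValid x y ip.2)).map (fun ip => (ip.1, pvMd x y ip.2))

-- the strict-less "keep the earlier one on ties" min step
def pvG (m z : Int × Int) : Int × Int := if z.2 < m.2 then z else m

lemma pvHead_insertBy (bef : Int × Int → Int × Int → Bool) (z : Int × Int) :
    ∀ (ys : List (Int × Int)) (m : Int × Int), ys.head? = some m →
      (PySem.List.insertBy bef z ys).head? = some (if bef z m then z else m) := by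
  intro ys m h
  cases ys with
  | nil => simp at h
  | cons a t =>
    simp at h; subst h
    by_cases hb : bef z a = true <;> simp [PySem.List.insertBy, hb]

-- head of the insertion-sort fold = fold of the strict-less min step
lemma pvHead_foldl_insertBy :
    ∀ (l acc : List (Int × Int)) (m : Int × Int), acc.head? = some m →
      (l.foldl (fun a z => PySem.List.insertBy (fun a b => decide (a.2 < b.2)) z a) acc).head?
        = some (l.foldl pvG m) := by
  intro l
  induction l with
  | nil => intro acc m h; simpa using h
  | cons z t ih =>
    intro acc m h
    simp only [List.foldl_cons]
    have hh := pvHead_insertBy (fun a b => decide (a.2 < b.2)) z acc m h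
    have := ih _ _ hh
    rw [this]
    congr 1
    simp [pvG]

-- B's fold once a real candidate is held: a pure min fold over the candidate list
lemma pvFold_after (x y : Int) :
    ∀ (l : List (Int × List Int)) (st : Int × Int),
      (∀ ip ∈ l, 0 ≤ ip.1) → 0 ≤ st.1 →
      l.foldl (pvStep x y) st = (pvCs x y l).foldl pvG st := by
  intro l
  induction l with
  | nil => intro st _ _; simp [pvCs]
  | cons ip t ih =>
    intro st hpos hst
    have hip : 0 ≤ ip.1 := hpos ip (by simp)
    have ht : ∀ q ∈ t, 0 ≤ q.1 := fun q hq => hpos q (by simp [hq])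
    by_cases hv : pvValid x y ip.2 = true
    · have hne : (st.1 == -1) = false := by
        simp only [beq_eq_false_iff_ne, ne_eq]; omega
      simp only [List.foldl_cons, pvCs, List.filter_cons, hv, List.map_cons, pvStep,
        hne, Bool.false_or, decide_eq_true_eq, if_true]
      by_cases hlt : pvMd x y ip.2 < st.2
      · simp only [if_pos hlt]
        rw [ih _ ht (by simpa using hip)]
        simp [pvCs, pvG, hlt]
      · simp only [if_neg hlt]
        rw [ih _ ht hst]
        simp [pvCs, pvG, hlt]
    · simp only [List.foldl_cons, pvStep, hv, pvCs, List.filter_cons, if_false,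
        Bool.false_eq_true]
      exact ih st ht hst

-- B's whole fold: -1,-1 until the first candidate, then the min fold over the rest
lemma pvFold_whole (x y : Int) :
    ∀ (l : List (Int × List Int)), (∀ ip ∈ l, 0 ≤ ip.1) →
      l.foldl (pvStep x y) (-1, -1)
        = (match pvCs x y l with
           | [] => ((-1 : Int), (-1 : Int))
           | c :: rest => rest.foldl pvG c) := by
  intro l
  induction l with
  | nil => intro _; simp [pvCs]
  | cons ip t ih =>
    intro hpos
    have hip : 0 ≤ ip.1 := hpos ip (by simp)
    have ht : ∀ q ∈ t, 0 ≤ q.1 := fun q hq => hpos q (by simp [hq])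
    by_cases hv : pvValid x y ip.2 = true
    · simp only [List.foldl_cons, pvStep, if_pos hv]
      rw [if_pos (by simp)]
      rw [pvFold_after x y t _ ht (by simpa using hip)]
      simp [pvCs, hv]
    · simp only [List.foldl_cons, pvStep, if_neg hv]
      rw [ih ht]
      simp [pvCs, hv]

lemma pvEnum_nonneg : ∀ (points : List (List Int)) (s : Int), 0 ≤ s →
    ∀ ip ∈ PySem.List.enumerate points s, 0 ≤ ip.1 := by
  intro points
  induction points with
  | nil => intro s _ ip h; simp [PySem.List.enumerate] at h
  | cons p t ih =>
    intro s hs ip h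
    rw [PySem.List.enumerate_cons] at h
    rcases List.mem_cons.mp h with h1 | h1
    · simp [h1]; omega
    · exact ih (s + 1) (by omega) ip h1

-- ===== VERDICT (by name: the statement is the Claim_ definition above) =====
theorem nearestValidPoint_spec : Claim_equal_nearestValidPoint := by
  unfold Claim_equal_nearestValidPoint
  intro x y points _ _
  unfold Spec_nearestValidPoint nearestValidPoint nearestValidPoint_alt
  have hpos := pvEnum_nonneg points 0 (by omega)
  rw [pvFold_whole x y _ hpos]
  have hcs : ((PySem.List.enumerate points 0).filter (fun ip => pvValid x y ip.2)).map
      (fun ip => (ip.1, pvMd x y ip.2)) = pvCs x y (PySem.List.enumerate points 0) := rfl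
  rw [hcs]
  cases hc : pvCs x y (PySem.List.enumerate points 0) with
  | nil => simp
  | cons c rest =>
    have hlen : ¬ ((c :: rest).length < 1) := by simp
    rw [if_neg hlen]
    have hsorted := PySem.List.sorted_eq_foldl_insertBy (c :: rest) (fun z : Int × Int => z.2)
    have hhead : (PySem.List.sorted (c :: rest) (fun z : Int × Int => z.2)).head?
        = some (rest.foldl pvG c) := by
      rw [hsorted]
      simp only [List.foldl_cons]
      exact pvHead_foldl_insertBy rest (PySem.List.insertBy _ c []) c
        (by simp [PySem.List.insertBy])
    cases hs : PySem.List.sorted (c :: rest) (fun z : Int × Int => z.2) with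
    | nil => rw [hs] at hhead; simp at hhead
    | cons h t =>
      rw [hs] at hhead
      simp only [List.head?_cons, Option.some.injEq] at hhead
      rw [PySem.List.pyGetD_zero_cons, hhead]
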